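-- pv_equiv track=rewrite | github.com/lederg/learningCNF | generators/samplers/FOND/generators/blocks_gen.py | to_pddl
-- ===== SOURCE A (Python) =====
-- def to_pddl(config):
--     res = ""
--     for stack in config:
--         for i, item in enumerate(stack):
--             if (i == 0): # The first item (i.e., on the table)
--                 res += f" (on-table b{item})"
--             else:
--                 res += f" (on b{item} b{stack[i-1]})"
--
--             if (i == len(stack) - 1): # Last item on the stack (clear)
--                 res += f" (clear b{item})"
--
--     return "(emptyhand)" + res
-- ===== SOURCE B (Python) =====
-- def to_pddl(config):
--     def chain(prev, rest):
--         # recursively emit the on-chain; the clear clause falls out at the base case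
--         if not rest:
--             return f" (clear b{prev})"
--         return f" (on b{rest[0]} b{prev})" + chain(rest[0], rest[1:])
--
--     def stacks(cfg):
--         if not cfg:
--             return ""
--         head = cfg[0]
--         here = "" if not head else f" (on-table b{head[0]})" + chain(head[0], head[1:])
--         return here + stacks(cfg[1:])
--
--     return "(emptyhand)" + stacks(config)
-- ===== Notes on version B (the rewrite author's own statement) =====
-- stated objective: alternative
-- what changed: Replaces A's iterative enumerate loop with index branching (i==0, i==len-1, stack[i-1] lookups) by a fully recursive formulation: a recursive chain(prev, rest) that threads the previous block through the recursion and emits the clear clause at the base case, inside a recursive descent over the configuration; no indices or length tests remain.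
import Mathlib
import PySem

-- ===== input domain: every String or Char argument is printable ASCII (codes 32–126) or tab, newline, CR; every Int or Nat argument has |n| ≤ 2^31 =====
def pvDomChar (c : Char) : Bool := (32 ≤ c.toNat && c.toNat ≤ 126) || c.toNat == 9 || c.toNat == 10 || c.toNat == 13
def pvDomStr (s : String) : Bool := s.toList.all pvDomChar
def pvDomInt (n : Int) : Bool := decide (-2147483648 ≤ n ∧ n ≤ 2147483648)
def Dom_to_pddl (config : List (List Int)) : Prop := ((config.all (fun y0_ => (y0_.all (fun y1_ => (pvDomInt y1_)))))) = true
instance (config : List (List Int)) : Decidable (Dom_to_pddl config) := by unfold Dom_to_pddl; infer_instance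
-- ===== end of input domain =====

-- B replaces A's iterative enumerate loop with index branching by a fully recursive
-- formulation (chain threads the previous block, the clear clause is the base case);
-- objective: alternative decomposition, same cost.

-- ===== PORT A =====
-- one iteration of A's inner 'for i, item in enumerate(stack)' loop
def pddlStep (stack : List Int) (res : String) (p : Int × Int) : String :=
  let res :=
    if p.1 = 0 then res ++ " (on-table b" ++ PySem.Int.toStr p.2 ++ ")"
    else res ++ " (on b" ++ PySem.Int.toStr p.2 ++ " b"
             ++ PySem.Int.toStr ((PySem.List.pyGet? stack (p.1 - 1)).getD 0) ++ ")"
  if p.1 = (stack.length : Int) - 1 then res ++ " (clear b" ++ PySem.Int.toStr p.2 ++ ")" else res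

def to_pddl (config : List (List Int)) : String :=
  let res := config.foldl (fun res stack =>
    (PySem.List.enumerate stack).foldl (pddlStep stack) res) ""
  "(emptyhand)" ++ res

-- ===== PORT B =====
-- B's recursive chain: thread the previous block; clear clause at the base case
def chainB (prev : Int) : List Int → String
  | [] => " (clear b" ++ PySem.Int.toStr prev ++ ")"
  | c :: t => " (on b" ++ PySem.Int.toStr c ++ " b" ++ PySem.Int.toStr prev ++ ")" ++ chainB c t

-- B's recursive descent over the configuration
def stacksB : List (List Int) → String
  | [] => ""
  | head :: cfg =>
      (match head with
       | [] => ""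
       | h :: t => " (on-table b" ++ PySem.Int.toStr h ++ ")" ++ chainB h t)
      ++ stacksB cfg

def to_pddl_alt (config : List (List Int)) : String :=
  "(emptyhand)" ++ stacksB config

-- ===== PRECONDITION & SPEC =====
def Spec_to_pddl (config : List (List Int)) (out : String) : Prop := out = to_pddl_alt config
instance (config : List (List Int)) (out : String) : Decidable (Spec_to_pddl config out) := by unfold Spec_to_pddl; infer_instance

-- ===== CLAIM (what is proved, stated in full; the proofs are below) =====
def Claim_equal_to_pddl : Prop := ∀ (config : List (List Int)), Dom_to_pddl config → Spec_to_pddl config (to_pddl config)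

-- ===== LEMMAS AND PROOFS =====

-- the tail of A's inner loop: suffix t of stack = pre ++ prev :: t, indices pre.length+1, …
theorem pddl_tail (t : List Int) : ∀ (pre : List Int) (prev : Int) (stack : List Int)
    (hs : stack = pre ++ prev :: t) (res : String),
    (PySem.List.enumerate t ((pre.length : Int) + 1)).foldl (pddlStep stack) res =
      res ++ (if t = [] then "" else chainB prev t) := by
  induction t with
  | nil =>
    intro pre prev stack hs res
    simp [PySem.List.enumerate]
  | cons c t' ih =>
    intro pre prev stack hs res
    rw [PySem.List.enumerate_cons]
    simp only [List.foldl_cons]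
    have h0 : ¬ ((pre.length : Int) + 1 = 0) := by omega
    have hstep : pddlStep stack res ((pre.length : Int) + 1, c) =
        (res ++ " (on b" ++ PySem.Int.toStr c ++ " b" ++ PySem.Int.toStr prev ++ ")")
        ++ (if t' = [] then " (clear b" ++ PySem.Int.toStr c ++ ")" else "") := by
      unfold pddlStep
      rw [if_neg h0]
      have e : ((pre.length : Int) + 1 - 1) = ((pre.length : Int)) := by ring
      rw [e, hs, PySem.List.pyGet?_append_length pre (c :: t') prev]
      simp only [Option.getD_some]
      rcases eq_or_ne t' [] with h' | h'
      · subst h'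
        rw [if_pos (by simp; omega)]
        simp [String.append_assoc, -String.reduceAppend]
      · rw [if_neg (by
          have := List.length_pos_of_ne_nil h'
          simp [List.length_append]
          omega)]
        simp [h']
    rw [hstep]
    have hrec := ih (pre ++ [prev]) c stack (by simpa using hs)
    have hidx : (((pre ++ [prev]).length : Int)) + 1 = (pre.length : Int) + 1 + 1 := by
      simp
    rw [hidx] at hrec
    rw [hrec]
    rcases eq_or_ne t' [] with h' | h'
    · subst h'
      simp [chainB, String.append_assoc, -String.reduceAppend]
    · simp [h', chainB, String.append_assoc, -String.reduceAppend]

-- A's inner loop over one whole stack equals B's per-stack string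
theorem pddl_stack (stack : List Int) (res : String) :
    (PySem.List.enumerate stack).foldl (pddlStep stack) res =
      res ++ (match stack with
              | [] => ""
              | h :: t => " (on-table b" ++ PySem.Int.toStr h ++ ")" ++ chainB h t) := by
  cases stack with
  | nil => simp [PySem.List.enumerate]
  | cons h t =>
    rw [PySem.List.enumerate_cons]
    simp only [List.foldl_cons]
    have hstep : pddlStep (h :: t) res (0, h) =
        (res ++ " (on-table b" ++ PySem.Int.toStr h ++ ")")
        ++ (if t = [] then " (clear b" ++ PySem.Int.toStr h ++ ")" else "") := by
      unfold pddlStep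
      rw [if_pos rfl]
      rcases eq_or_ne t [] with h' | h'
      · subst h'
        rw [if_pos (by simp)]
        simp [String.append_assoc, -String.reduceAppend]
      · rw [if_neg (by
          have := List.length_pos_of_ne_nil h'
          simp
          omega)]
        simp [h']
    rw [hstep]
    have htail := pddl_tail t [] h (h :: t) (by simp)
    norm_num at htail
    norm_num
    rw [htail]
    rcases eq_or_ne t [] with h' | h'
    · subst h'
      simp [chainB, String.append_assoc, -String.reduceAppend]
    · simp [h', String.append_assoc, -String.reduceAppend]

theorem pddl_outer (config : List (List Int)) : ∀ (res : String),
    config.foldl (fun res stack => (PySem.List.enumerate stack).foldl (pddlStep stack) res) res =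
      res ++ stacksB config := by
  induction config with
  | nil => intro res; simp [stacksB]
  | cons s cfg ih =>
    intro res
    simp only [List.foldl_cons]
    rw [pddl_stack, ih]
    cases s <;> simp [stacksB, String.append_assoc, -String.reduceAppend]

-- ===== VERDICT (by name: the statement is the Claim_ definition above) =====
theorem to_pddl_spec : Claim_equal_to_pddl := by
  intro config _
  unfold Spec_to_pddl to_pddl to_pddl_alt
  rw [pddl_outer]
  simp
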